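-- pv_equiv track=rewrite | github.com/sigridfuhrenkamp-cyber/normalize.css | polyglot_normalization_hack.py | interpret_as_binary
-- ===== SOURCE A (Python) =====
-- def interpret_as_binary(content):
--     """Interpret as binary/hex"""
--     # Convert content to bytes and extract patterns
--     content_bytes = content.encode('utf-8', errors='ignore')
--
--     # Look for binary patterns in asterisk positions
--     asterisk_positions = [i for i, c in enumerate(content) if c == '*']
--
--     # Generate binary payload
--     binary_bytes = []
--     for i, pos in enumerate(asterisk_positions[:32]):
--         # Binary normalization factor
--         if pos < len(content_bytes):
--             binary_byte = content_bytes[pos] ^ (i * 19) % 256  # Prime multiplier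
--             binary_bytes.append(binary_byte)
--
--     try:
--         return bytes(binary_bytes).decode('latin-1', errors='ignore')
--     except:
--         return None
-- ===== SOURCE B (Python) =====
-- def interpret_as_binary(content):
--     """Interpret as binary/hex"""
--     # Segment-based: split on '*' (maxsplit=32) and derive each asterisk's
--     # index as a running prefix sum of segment lengths -- no per-character scan.
--     content_bytes = content.encode('utf-8', errors='ignore')
--     parts = content.split('*', 32)
--     out = bytearray()
--     pos = -1
--     for i, part in enumerate(parts[:-1]):
--         pos += len(part) + 1
--         if pos < len(content_bytes):
--             out.append(content_bytes[pos] ^ (i * 19) % 256)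
--     try:
--         return bytes(out).decode('latin-1', errors='ignore')
--     except:
--         return None
-- ===== Notes on version B (the rewrite author's own statement) =====
-- stated objective: faster
-- what changed: Replaces A's per-character enumerate scan that builds an asterisk-position index list (then a second loop over its first 32 entries) with str.split on the asterisk character with maxsplit 32: asterisk indices are recovered as a running prefix sum of the split segments' lengths, so no Python-level character scan or position list exists.
import Mathlib
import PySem

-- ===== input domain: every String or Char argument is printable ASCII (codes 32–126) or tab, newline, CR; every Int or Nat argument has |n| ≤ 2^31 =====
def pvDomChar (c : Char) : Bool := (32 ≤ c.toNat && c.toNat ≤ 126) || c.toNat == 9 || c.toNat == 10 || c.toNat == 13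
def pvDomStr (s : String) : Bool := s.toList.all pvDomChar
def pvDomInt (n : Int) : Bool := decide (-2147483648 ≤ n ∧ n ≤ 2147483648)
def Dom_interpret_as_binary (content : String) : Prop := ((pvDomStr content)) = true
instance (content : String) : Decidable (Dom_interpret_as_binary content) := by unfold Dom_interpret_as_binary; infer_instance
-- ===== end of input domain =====

-- B replaces A's per-char scan + asterisk-position list with split('*', 32) and prefix sums of segment lengths (faster by constant factor).
-- utf-8 encode is ported as the char-code list (exact on the ASCII domain); latin-1 decode as char-of-byte (exact: it never raises).

-- ===== PORT A =====
-- [i for i, c in enumerate(content) if c == '*']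
def pvAPositions : List Char → Nat → List Nat
  | [], _ => []
  | c :: cs, k => if c = '*' then k :: pvAPositions cs (k + 1) else pvAPositions cs (k + 1)

-- for i, pos in enumerate(asterisk_positions[:32]): … (the [:32] is taken by the caller)
def pvALoop (bytes : List Nat) : List Nat → Nat → List Nat → List Nat
  | [], _, acc => acc
  | p :: ps, i, acc =>
      pvALoop bytes ps (i + 1)
        (if p < bytes.length then acc ++ [bytes.getD p 0 ^^^ (i * 19 % 256)] else acc)

def interpret_as_binary (content : String) : Option String :=
  let contentBytes := content.toList.map Char.toNat   -- content.encode('utf-8'): exact on the ASCII domain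
  let asteriskPositions := pvAPositions content.toList 0
  let binaryBytes := pvALoop contentBytes (asteriskPositions.take 32) 0 []
  -- bytes(..).decode('latin-1', errors='ignore') never raises, so the try/except returns the string
  some (String.ofList (binaryBytes.map Char.ofNat))

-- ===== PORT B =====
-- content.split('*', maxsplit): a hand port (exact): m counts remaining splits; pvConsHead prepends c to the head segment
def pvConsHead (c : Char) : List (List Char) → List (List Char)
  | [] => []
  | p :: ps => (c :: p) :: ps

def pvSplit : List Char → Nat → List (List Char)
  | cs, 0 => [cs]
  | [], _ + 1 => [[]]
  | c :: cs, m + 1 =>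
      if c = '*' then [] :: pvSplit cs m
      else pvConsHead c (pvSplit cs (m + 1))

-- for i, part in enumerate(parts[:-1]): pos += len(part) + 1; … (pos starts at -1, hence Int)
def pvBLoop (bytes : List Nat) : List (List Char) → Nat → Int → List Nat → List Nat
  | [], _, _, acc => acc
  | part :: rest, i, pos, acc =>
      let pos' := pos + part.length + 1
      pvBLoop bytes rest (i + 1) pos'
        (if pos' < (bytes.length : Int) then acc ++ [bytes.getD pos'.toNat 0 ^^^ (i * 19 % 256)] else acc)

def interpret_as_binary_alt (content : String) : Option String :=
  let contentBytes := content.toList.map Char.toNat   -- content.encode('utf-8'): exact on the ASCII domain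
  let parts := pvSplit content.toList 32
  some (String.ofList ((pvBLoop contentBytes parts.dropLast 0 (-1) []).map Char.ofNat))

-- ===== PRECONDITION & SPEC =====
def Spec_interpret_as_binary (content : String) (out : Option String) : Prop := out = interpret_as_binary_alt content
instance (content : String) (out : Option String) : Decidable (Spec_interpret_as_binary content out) := by unfold Spec_interpret_as_binary; infer_instance

-- ===== CLAIM (what is proved, stated in full; the proofs are below) =====
def Claim_equal_interpret_as_binary : Prop := ∀ (content : String), Dom_interpret_as_binary content → Spec_interpret_as_binary content (interpret_as_binary content)

-- ===== LEMMAS AND PROOFS =====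

theorem pvSplit_ne_nil (cs : List Char) (m : Nat) : pvSplit cs m ≠ [] := by
  match cs, m with
  | cs, 0 => simp [pvSplit]
  | [], m + 1 => simp [pvSplit]
  | c :: cs, m + 1 =>
    by_cases hc : c = '*'
    · simp [pvSplit, hc]
    · simp only [pvSplit, hc, if_false]
      have := pvSplit_ne_nil cs (m + 1)
      cases h : pvSplit cs (m + 1) with
      | nil => exact absurd h this
      | cons p ps => simp [pvConsHead]

theorem dropLast_consHead (c : Char) (l : List (List Char)) :
    (pvConsHead c l).dropLast = pvConsHead c l.dropLast := by
  match l with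
  | [] => simp [pvConsHead]
  | [p] => simp [pvConsHead]
  | p :: q :: r => simp [pvConsHead, List.dropLast]

-- prepending one non-'*' char to the head segment just shifts pos by one
theorem pvBLoop_consHead (bytes : List Nat) (c : Char) (l : List (List Char))
    (i : Nat) (pos : Int) (acc : List Nat) :
    pvBLoop bytes (pvConsHead c l) i pos acc = pvBLoop bytes l i (pos + 1) acc := by
  match l with
  | [] => simp [pvConsHead, pvBLoop]
  | p :: ps =>
    simp only [pvConsHead, pvBLoop, List.length_cons]
    have h : pos + ((p.length : Int) + 1) + 1 = pos + 1 + p.length + 1 := by ring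
    push_cast
    rw [h]

-- B's segment loop over (split cs m).dropLast from pos = base - 1 equals A's loop over the first m asterisk positions
theorem pvBLoop_eq_pvALoop (bytes : List Nat) (cs : List Char) :
    ∀ (m base i : Nat) (acc : List Nat),
      pvBLoop bytes (pvSplit cs m).dropLast i ((base : Int) - 1) acc
        = pvALoop bytes ((pvAPositions cs base).take m) i acc := by
  induction cs with
  | nil =>
    intro m base i acc
    cases m <;> simp [pvSplit, pvBLoop, pvAPositions, pvALoop]
  | cons c cs ih =>
    intro m base i acc
    cases m with
    | zero => simp [pvSplit, pvBLoop, pvAPositions, pvALoop]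
    | succ m =>
      by_cases hc : c = '*'
      · simp only [pvSplit, pvAPositions, hc, if_true]
        obtain ⟨p, ps, hps⟩ : ∃ p ps, pvSplit cs m = p :: ps := by
          cases h : pvSplit cs m with
          | nil => exact absurd h (pvSplit_ne_nil cs m)
          | cons p ps => exact ⟨p, ps, rfl⟩
        rw [hps, List.dropLast_cons₂, List.take_succ_cons]
        have ihm := ih m (base + 1) (i + 1)
          (if base < bytes.length then acc ++ [bytes.getD base 0 ^^^ (i * 19 % 256)] else acc)
        rw [hps] at ihm
        simp only [pvBLoop, pvALoop, List.length_nil, Nat.cast_zero, add_zero]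
        have hpos0 : (base : Int) - 1 + 1 = (base : Int) := by ring
        rw [hpos0]
        simp only [Nat.cast_lt, Int.toNat_natCast]
        rw [show ((base : Nat) : Int) = ((base + 1 : Nat) : Int) - 1 by push_cast; ring]
        exact ihm
      · simp only [pvSplit, pvAPositions, hc, if_false]
        rw [dropLast_consHead, pvBLoop_consHead]
        have : (base : Int) - 1 + 1 = ((base + 1 : Nat) : Int) - 1 := by push_cast; ring
        rw [this, ih (m + 1) (base + 1) i acc]

-- ===== VERDICT (by name: the statement is the Claim_ definition above) =====
theorem interpret_as_binary_spec : Claim_equal_interpret_as_binary := by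
  intro content _
  unfold Spec_interpret_as_binary
  have h := pvBLoop_eq_pvALoop (content.toList.map Char.toNat) content.toList 32 0 0 []
  simp only [Nat.cast_zero, zero_sub] at h
  simp only [interpret_as_binary, interpret_as_binary_alt, h]
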